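-- pv_equiv track=rewrite | github.com/urban/agent-skills-spec-pack | skills/write-approval-view/scripts/render_approval_view_html.py | split_subsections
-- ===== SOURCE A (Python) =====
-- def trim_blank_lines(lines: list[str]) -> list[str]:
--     start = 0
--     end = len(lines)
--     while start < end and not lines[start].strip():
--         start += 1
--     while end > start and not lines[end - 1].strip():
--         end -= 1
--     return lines[start:end]
--
-- def split_subsections(lines: list[str]) -> list[tuple[str | None, list[str]]]:
--     sections: list[tuple[str | None, list[str]]] = []
--     current_title: str | None = None
--     current_lines: list[str] = []
--
--     for line in lines:
--         if line.startswith("### "):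
--             sections.append((current_title, trim_blank_lines(current_lines)))
--             current_title = line[4:].strip()
--             current_lines = []
--         else:
--             current_lines.append(line)
--
--     sections.append((current_title, trim_blank_lines(current_lines)))
--     return [(title, chunk) for title, chunk in sections if title is not None or chunk]
-- ===== SOURCE B (Python) =====
-- def _drop_blank_prefix(xs):
--     for i, line in enumerate(xs):
--         if line.strip():
--             return xs[i:]
--     return []
--
-- def _trim(chunk):
--     return _drop_blank_prefix(_drop_blank_prefix(chunk)[::-1])[::-1]
--
-- def split_subsections(lines):
--     secs = []   # titled sections, collected back-to-front
--     chunk = []  # lines of the current chunk, in reverse order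
--     for line in reversed(lines):
--         if line.startswith("### "):
--             secs.append((line[4:].strip(), chunk[::-1]))
--             chunk = []
--         else:
--             chunk.append(line)
--     raw = [(None, chunk[::-1])] + secs[::-1]
--     out = []
--     for title, c in raw:
--         c = _trim(c)
--         if title is not None or c:
--             out.append((title, c))
--     return out
-- ===== Notes on version B (the rewrite author's own statement) =====
-- stated objective: alternative
-- what changed: A makes one forward pass with mutable section/title/chunk accumulator state, trimming each chunk as it is appended; B scans the lines backwards building the raw untrimmed sections back-to-front, then trims and filters every section in a separate second pass, with trimming done by prefix-dropping on the chunk and its reverse instead of index arithmetic.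
import Mathlib
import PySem

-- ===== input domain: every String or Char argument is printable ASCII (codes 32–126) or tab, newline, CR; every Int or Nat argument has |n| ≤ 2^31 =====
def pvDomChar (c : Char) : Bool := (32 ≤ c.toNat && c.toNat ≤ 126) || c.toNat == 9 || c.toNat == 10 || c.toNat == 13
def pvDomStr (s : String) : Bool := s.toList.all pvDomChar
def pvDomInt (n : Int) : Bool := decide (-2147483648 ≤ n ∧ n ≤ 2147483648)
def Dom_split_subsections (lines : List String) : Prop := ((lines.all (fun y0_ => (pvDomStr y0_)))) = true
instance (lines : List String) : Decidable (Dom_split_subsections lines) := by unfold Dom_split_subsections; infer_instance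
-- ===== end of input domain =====

-- B replaces A's single stateful accumulator pass by a recursive split into raw
-- sections followed by a separate trim-and-filter pass (alternative decomposition).

-- 'not line.strip()': the Python truthiness test for a blank line (used by both versions)
def pvBlank (s : String) : Bool := PySem.Str.strip s == ""

-- ===== PORT A =====
-- 'while start < end and not lines[start].strip(): start += 1'
-- (lines[start] is in range because start < end ≤ len lines; getD is exact there)
def pvFindStart (lines : List String) (start stop : Nat) : Nat :=
  if start < stop ∧ pvBlank (lines.getD start "") then pvFindStart lines (start + 1) stop
  else start
termination_by stop - start

-- 'while end > start and not lines[end - 1].strip(): end -= 1'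
def pvFindEnd (lines : List String) (start e : Nat) : Nat :=
  if start < e ∧ pvBlank (lines.getD (e - 1) "") then pvFindEnd lines start (e - 1)
  else e

def trim_blank_lines (lines : List String) : List String :=
  let start := pvFindStart lines 0 lines.length
  let e := pvFindEnd lines start lines.length
  PySem.List.slice lines (some (start : Int)) (some (e : Int))

-- the body of A's for-loop, state = (sections, current_title, current_lines)
def pvStepA (s : List (Option String × List String) × Option String × List String)
    (line : String) : List (Option String × List String) × Option String × List String :=
  if PySem.Str.startswith line "### " then
    (s.1 ++ [(s.2.1, trim_blank_lines s.2.2)],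
     some (PySem.Str.strip (PySem.Str.slice line (some 4) none)), [])
  else
    (s.1, s.2.1, s.2.2 ++ [line])

def split_subsections (lines : List String) : List (Option String × List String) :=
  let st := lines.foldl pvStepA ([], none, [])
  (st.1 ++ [(st.2.1, trim_blank_lines st.2.2)]).filter
    (fun tc => tc.1.isSome || !tc.2.isEmpty)

-- ===== PORT B =====
-- 'for i, line in enumerate(xs): if line.strip(): return xs[i:]  /  return []'
def pvDropBlankPrefix : List String → List String
  | [] => []
  | l :: rs => if pvBlank l then pvDropBlankPrefix rs else l :: rs

-- xs[::-1] is List.reverse (PySem.List.slice?_none_none_neg_one)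
def pvTrim (chunk : List String) : List String :=
  (pvDropBlankPrefix (pvDropBlankPrefix chunk).reverse).reverse

-- body of B's backwards loop, state = (secs collected back-to-front, current chunk reversed);
-- chunk[::-1] is List.reverse (PySem.List.slice?_none_none_neg_one)
def pvStepB (st : List (Option String × List String) × List String)
    (line : String) : List (Option String × List String) × List String :=
  if PySem.Str.startswith line "### " then
    (st.1 ++ [(some (PySem.Str.strip (PySem.Str.slice line (some 4) none)), st.2.reverse)], [])
  else
    (st.1, st.2 ++ [line])

-- 'for line in reversed(lines): …' then 'raw = [(None, chunk[::-1])] + secs[::-1]'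
def pvRawSections (lines : List String) : List (Option String × List String) :=
  let st := lines.reverse.foldl pvStepB ([], [])
  (none, st.2.reverse) :: st.1.reverse

def split_subsections_alt (lines : List String) : List (Option String × List String) :=
  (pvRawSections lines).foldl
    (fun out tc =>
      let c := pvTrim tc.2
      if tc.1.isSome || !c.isEmpty then out ++ [(tc.1, c)] else out)
    []

-- ===== PRECONDITION & SPEC =====
def Spec_split_subsections (lines : List String) (out : List (Option String × List String)) : Prop := out = split_subsections_alt lines
instance (lines : List String) (out : List (Option String × List String)) : Decidable (Spec_split_subsections lines out) := by unfold Spec_split_subsections; infer_instance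

-- ===== CLAIM (what is proved, stated in full; the proofs are below) =====
def Claim_equal_split_subsections : Prop := ∀ (lines : List String), Dom_split_subsections lines → Spec_split_subsections lines (split_subsections lines)

-- ===== LEMMAS AND PROOFS =====

-- recursive characterisation of B's raw sections (proof-only)
def pvSections (title : Option String) : List String → List (Option String × List String)
  | [] => [(title, [])]
  | head :: tail =>
    if PySem.Str.startswith head "### " then
      (title, []) :: pvSections (some (PySem.Str.strip (PySem.Str.slice head (some 4) none))) tail
    else
      match pvSections title tail with
      | (t, c) :: rest => (t, head :: c) :: rest
      | [] => []  -- unreachable: pvSections never returns []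

-- findStart stays in range and computes the blank-prefix drop point
lemma findStart_drop (xs : List String) (i : Nat) (h : i ≤ xs.length) :
    pvFindStart xs i xs.length ≤ xs.length ∧
      xs.drop (pvFindStart xs i xs.length) = pvDropBlankPrefix (xs.drop i) := by
  fun_induction pvFindStart xs i xs.length with
  | case1 start hc ih =>
    have hlt : start < xs.length := hc.1
    have := ih (by omega)
    refine ⟨this.1, ?_⟩
    rw [this.2, List.drop_eq_getElem_cons hlt]
    have hb : pvBlank xs[start] = true := by
      have := hc.2; rwa [List.getD_eq_getElem xs "" hlt] at this
    simp [pvDropBlankPrefix, hb]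
  | case2 start hc =>
    refine ⟨h, ?_⟩
    by_cases he : start < xs.length
    · have hb : ¬ pvBlank xs[start] = true := by
        intro hbl
        exact hc ⟨he, by rwa [List.getD_eq_getElem xs "" he]⟩
      rw [List.drop_eq_getElem_cons he]
      simp [pvDropBlankPrefix, hb]
    · rw [List.drop_of_length_le (by omega)]
      simp [pvDropBlankPrefix]

-- findEnd stays above start and computes the blank-suffix drop point
lemma findEnd_take (xs : List String) (s e : Nat) (hse : s ≤ e) (hel : e ≤ xs.length) :
    s ≤ pvFindEnd xs s e ∧
      (xs.drop s).take (pvFindEnd xs s e - s)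
        = (pvDropBlankPrefix ((xs.drop s).take (e - s)).reverse).reverse := by
  fun_induction pvFindEnd xs s e with
  | case1 e hc ih =>
    have hs : s < e := hc.1
    have := ih (by omega) (by omega)
    refine ⟨this.1, ?_⟩
    rw [this.2]
    have hidx : e - 1 - s < (xs.drop s).length := by
      rw [List.length_drop]; omega
    have hsome : ((xs.drop s).take (e - s))[e - 1 - s]? = some xs[e-1] := by
      rw [List.getElem?_take_of_lt (by omega), List.getElem?_drop]
      have : s + (e - 1 - s) = e - 1 := by omega
      rw [this, List.getElem?_eq_getElem (by omega)]
    have hsplit : (xs.drop s).take (e - s)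
        = (xs.drop s).take (e - 1 - s) ++ [xs[e-1]] := by
      have : e - s = (e - 1 - s) + 1 := by omega
      rw [this, List.take_add_one, List.getElem?_drop]
      have h2 : s + (e - 1 - s) = e - 1 := by omega
      rw [h2, List.getElem?_eq_getElem (by omega)]
      rfl
    have hb : pvBlank xs[e-1] = true := by
      have := hc.2; rwa [List.getD_eq_getElem xs "" (by omega)] at this
    rw [hsplit, List.reverse_append]
    simp [pvDropBlankPrefix, hb]
  | case2 e hc =>
    refine ⟨hse, ?_⟩
    rcases Nat.eq_or_lt_of_le hse with heq | hlt
    · subst heq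
      simp [pvDropBlankPrefix]
    · have hb : ¬ pvBlank xs[e-1] = true := by
        intro hbl
        exact hc ⟨hlt, by rwa [List.getD_eq_getElem xs "" (by omega)]⟩
      have hsplit : (xs.drop s).take (e - s)
          = (xs.drop s).take (e - 1 - s) ++ [xs[e-1]] := by
        have : e - s = (e - 1 - s) + 1 := by omega
        rw [this, List.take_add_one, List.getElem?_drop]
        have h2 : s + (e - 1 - s) = e - 1 := by omega
        rw [h2, List.getElem?_eq_getElem (by omega)]
        rfl
      rw [hsplit, List.reverse_append]
      simp [pvDropBlankPrefix, hb]

lemma trim_eq (xs : List String) : trim_blank_lines xs = pvTrim xs := by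
  unfold trim_blank_lines pvTrim
  obtain ⟨hs, hdrop⟩ := findStart_drop xs 0 (Nat.zero_le _)
  rw [List.drop_zero] at hdrop
  obtain ⟨-, htake⟩ := findEnd_take xs (pvFindStart xs 0 xs.length) xs.length hs le_rfl
  rw [PySem.List.slice_natCast, htake, hdrop]
  congr 2
  rw [← hdrop, List.take_of_length_le (by rw [List.length_drop])]

-- step/recursion unfolding lemmas
lemma stepA_pos (s : List (Option String × List String) × Option String × List String)
    (l : String) (h : PySem.Str.startswith l "### " = true) :
    pvStepA s l = (s.1 ++ [(s.2.1, trim_blank_lines s.2.2)],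
      some (PySem.Str.strip (PySem.Str.slice l (some 4) none)), []) := by
  have hts : "### ".toList = ['#', '#', '#', ' '] := rfl
  have h' : PySem.Chars.startswith l.toList ['#', '#', '#', ' '] = true := by
    simpa [hts] using h
  simp [pvStepA, h']

lemma stepA_neg (s : List (Option String × List String) × Option String × List String)
    (l : String) (h : ¬ PySem.Str.startswith l "### " = true) :
    pvStepA s l = (s.1, s.2.1, s.2.2 ++ [l]) := by
  have hts : "### ".toList = ['#', '#', '#', ' '] := rfl
  have h' : PySem.Chars.startswith l.toList ['#', '#', '#', ' '] = false := by
    simpa [hts] using h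
  simp [pvStepA, h']

lemma sections_cons_pos (t : Option String) (l : String) (rs : List String)
    (h : PySem.Str.startswith l "### " = true) :
    pvSections t (l :: rs)
      = (t, []) :: pvSections (some (PySem.Str.strip (PySem.Str.slice l (some 4) none))) rs := by
  have hts : "### ".toList = ['#', '#', '#', ' '] := rfl
  have h' : PySem.Chars.startswith l.toList ['#', '#', '#', ' '] = true := by
    simpa [hts] using h
  simp [pvSections, h']

lemma sections_cons_neg (t : Option String) (l : String) (rs : List String)
    (h : ¬ PySem.Str.startswith l "### " = true) :
    pvSections t (l :: rs)
      = match pvSections t rs with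
        | (t0, c0) :: tail => (t0, l :: c0) :: tail
        | [] => [] := by
  have hts : "### ".toList = ['#', '#', '#', ' '] := rfl
  have h' : PySem.Chars.startswith l.toList ['#', '#', '#', ' '] = false := by
    simpa [hts] using h
  simp [pvSections, h']

-- prepend pending lines to the first chunk (proof-only helper)
def pvPrependFirst (c : List String) : List (Option String × List String) → List (Option String × List String)
  | (t, c0) :: rest => (t, c ++ c0) :: rest
  | [] => []

lemma sections_shape (rest : List String) (t : Option String) :
    ∃ c tail, pvSections t rest = (t, c) :: tail := by
  induction rest generalizing t with
  | nil => exact ⟨[], [], rfl⟩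
  | cons head tail ih =>
    by_cases hl : PySem.Str.startswith head "### " = true
    · exact ⟨[], _, sections_cons_pos t head tail hl⟩
    · obtain ⟨c, tl, h⟩ := ih t
      exact ⟨head :: c, tl, by rw [sections_cons_neg t head tail hl, h]⟩

lemma fold_shift (rest : List String) (s : List (Option String × List String))
    (t : Option String) (c : List String) :
    rest.foldl pvStepA (s, t, c)
      = (s ++ (rest.foldl pvStepA ([], t, c)).1, (rest.foldl pvStepA ([], t, c)).2) := by
  induction rest generalizing s t c with
  | nil => simp
  | cons l rs ih =>
    by_cases hl : PySem.Str.startswith l "### " = true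
    · rw [List.foldl_cons, List.foldl_cons, stepA_pos _ l hl, stepA_pos _ l hl]
      rw [ih (s ++ [(t, trim_blank_lines c)]), ih ([] ++ [(t, trim_blank_lines c)])]
      simp
    · rw [List.foldl_cons, List.foldl_cons, stepA_neg _ l hl, stepA_neg _ l hl]
      exact ih s t (c ++ [l])

lemma fold_sections (rest : List String) (t : Option String) (c : List String) :
    (rest.foldl pvStepA ([], t, c)).1
      ++ [((rest.foldl pvStepA ([], t, c)).2.1, trim_blank_lines (rest.foldl pvStepA ([], t, c)).2.2)]
      = (pvPrependFirst c (pvSections t rest)).map (fun tc => (tc.1, pvTrim tc.2)) := by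
  induction rest generalizing t c with
  | nil => simp [pvSections, pvPrependFirst, trim_eq]
  | cons l rs ih =>
    by_cases hl : PySem.Str.startswith l "### " = true
    · rw [List.foldl_cons, stepA_pos _ l hl, sections_cons_pos t l rs hl]
      rw [fold_shift rs ([] ++ [(t, trim_blank_lines c)])]
      obtain ⟨c0, tl, hX⟩ :=
        sections_shape rs (some (PySem.Str.strip (PySem.Str.slice l (some 4) none)))
      have hIH := ih (some (PySem.Str.strip (PySem.Str.slice l (some 4) none))) []
      rw [hX] at hIH
      simp only [pvPrependFirst, List.nil_append] at hIH
      rw [hX]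
      simp [pvPrependFirst, ← hIH, trim_eq]
    · rw [List.foldl_cons, stepA_neg _ l hl, sections_cons_neg t l rs hl]
      rw [ih t (c ++ [l])]
      obtain ⟨c0, tl, hX⟩ := sections_shape rs t
      rw [hX]
      simp [pvPrependFirst]

lemma foldl_filter_append (L : List (Option String × List String))
    (acc : List (Option String × List String)) :
    L.foldl (fun out tc =>
      let c := pvTrim tc.2
      if tc.1.isSome || !c.isEmpty then out ++ [(tc.1, c)] else out) acc
    = acc ++ (L.map (fun tc => (tc.1, pvTrim tc.2))).filter (fun tc => tc.1.isSome || !tc.2.isEmpty) := by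
  induction L generalizing acc with
  | nil => simp
  | cons tc L ih =>
    by_cases hp : (tc.1.isSome || !(pvTrim tc.2).isEmpty) = true
    · simp only [List.foldl_cons, List.map_cons, List.filter_cons, hp, if_true]
      rw [ih]
      simp
    · simp only [List.foldl_cons, List.map_cons, List.filter_cons, hp]
      rw [ih]
      simp

-- B's backwards fold builds exactly pvSections
lemma raw_sections_eq (lines : List String) (t : Option String) :
    pvSections t lines
      = (t, (lines.reverse.foldl pvStepB ([], [])).2.reverse)
          :: (lines.reverse.foldl pvStepB ([], [])).1.reverse := by
  induction lines generalizing t with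
  | nil => simp [pvSections]
  | cons l ls ih =>
    have hrev : (l :: ls).reverse.foldl pvStepB ([], [])
        = pvStepB (ls.reverse.foldl pvStepB ([], [])) l := by
      rw [List.reverse_cons, List.foldl_append, List.foldl_cons, List.foldl_nil]
    by_cases hl : PySem.Str.startswith l "### " = true
    · have hts : "### ".toList = ['#', '#', '#', ' '] := rfl
      have h' : PySem.Chars.startswith l.toList ['#', '#', '#', ' '] = true := by
        simpa [hts] using hl
      rw [sections_cons_pos t l ls hl, ih, hrev]
      simp [pvStepB, h']
    · have hts : "### ".toList = ['#', '#', '#', ' '] := rfl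
      have h' : PySem.Chars.startswith l.toList ['#', '#', '#', ' '] = false := by
        simpa [hts] using hl
      rw [sections_cons_neg t l ls hl, ih t, hrev]
      simp [pvStepB, h']

lemma rawSections_eq_sections (lines : List String) :
    pvRawSections lines = pvSections none lines := by
  rw [raw_sections_eq lines none]
  rfl

-- ===== VERDICT (by name: the statement is the Claim_ definition above) =====
theorem split_subsections_spec : Claim_equal_split_subsections := by
  intro lines _
  show split_subsections lines = split_subsections_alt lines
  have hA : split_subsections lines
      = ((lines.foldl pvStepA ([], none, [])).1
          ++ [((lines.foldl pvStepA ([], none, [])).2.1,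
               trim_blank_lines (lines.foldl pvStepA ([], none, [])).2.2)]).filter
          (fun tc => tc.1.isSome || !tc.2.isEmpty) := rfl
  rw [hA]
  unfold split_subsections_alt
  rw [rawSections_eq_sections, foldl_filter_append]
  obtain ⟨c0, tl, hX⟩ := sections_shape lines none
  have hF := fold_sections lines none []
  rw [hX] at hF
  simp only [pvPrependFirst, List.nil_append] at hF
  rw [hF, hX]
  simp
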